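-- pv_equiv track=rewrite | github.com/david-a-parry/vase | vase/utils.py | reg2bins
-- ===== SOURCE A (Python) =====
-- def reg2bins(begin, end, min_shift=14, depth=5):
--     '''Calculate possible bins for tbi/csi index based retrieval'''
--     t, s = 0, min_shift + (depth << 1) + depth
--     for l in range(depth + 1):
--         b, e = t + (begin >> s), t + (end >> s)
--         n = e - b + 1
--         for k in range(b, e + 1):
--             yield k
--             n += 1
--         t += 1 << ((l << 1) + l)
--         s -= 3
-- ===== SOURCE B (Python) =====
-- def reg2bins(begin, end, min_shift=14, depth=5):
--     '''Calculate possible bins for tbi/csi index based retrieval'''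
--     if depth < 0:
--         return
--     # Shift begin/end ONCE, to the deepest level's bin numbers; every
--     # shallower level's range is obtained by the parent map k -> (k-1)>>3
--     # in bin-number space (bin k's children are 8k+1..8k+8), pushed on a
--     # stack and popped to emit levels top-down.
--     t = (8 ** depth - 1) // 7
--     b, e = t + (begin >> min_shift), t + (end >> min_shift)
--     stack = []
--     for _ in range(depth + 1):
--         stack.append((b, e))
--         b, e = (b - 1) >> 3, (e - 1) >> 3
--     while stack:
--         b, e = stack.pop()
--         yield from range(b, e + 1)
-- ===== Notes on version B (the rewrite author's own statement) =====
-- stated objective: alternative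
-- what changed: Instead of re-shifting begin/end at every level with running accumulators t and s, B shifts them once by min_shift to deepest-level bin numbers, derives each shallower level's range by the bin-tree parent map k -> (k-1)>>3 pushed on a stack, and emits levels by popping the stack.
import Mathlib
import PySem

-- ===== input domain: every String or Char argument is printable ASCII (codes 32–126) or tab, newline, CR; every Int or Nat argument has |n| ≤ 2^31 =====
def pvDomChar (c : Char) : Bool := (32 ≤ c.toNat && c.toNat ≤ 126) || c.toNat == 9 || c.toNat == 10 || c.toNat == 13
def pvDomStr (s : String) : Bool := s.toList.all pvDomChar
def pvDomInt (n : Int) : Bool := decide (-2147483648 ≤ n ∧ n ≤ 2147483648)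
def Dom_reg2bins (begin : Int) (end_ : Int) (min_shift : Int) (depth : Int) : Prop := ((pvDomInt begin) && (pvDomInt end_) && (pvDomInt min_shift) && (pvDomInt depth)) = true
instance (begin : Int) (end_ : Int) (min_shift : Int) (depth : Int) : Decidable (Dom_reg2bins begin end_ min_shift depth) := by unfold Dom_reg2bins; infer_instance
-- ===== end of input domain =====

-- B is a different algorithm: it shifts begin/end once (by min_shift) to deepest-level bin
-- numbers, derives every shallower level by the parent map k -> (k-1)>>3 in bin-number space
-- pushed on a stack, and emits by popping (objective: alternative; same asymptotic cost).


-- ===== PORT A =====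
-- one level of A's outer loop: state is (yielded so far, t, s); the inner
-- 'for k in range(b, e+1): yield k; n += 1' is the inner foldl carrying (acc, n)
def r2bStepA (begin : Int) (end_ : Int) (st : List Int × Int × Int) (l : Int) : List Int × Int × Int :=
  let t := st.2.1
  let s := st.2.2
  let b := t + (begin >>> s.toNat)
  let e := t + (end_ >>> s.toNat)
  let n := e - b + 1
  let inner := (PySem.List.pyRange b (e + 1) 1).foldl
      (fun (p : List Int × Int) k => (p.1 ++ [k], p.2 + 1)) (st.1, n)
  (inner.1, t + ((1:Int) <<< ((l <<< (1:Nat)) + l).toNat), s - 3)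

def reg2bins (begin : Int) (end_ : Int) (min_shift : Int) (depth : Int) : List Int :=
  ((PySem.List.pyRange 0 (depth + 1) 1).foldl (r2bStepA begin end_)
      ([], 0, min_shift + (depth <<< (1:Nat)) + depth)).1

-- ===== PORT B =====
-- parent of a bin-number pair: b, e = (b - 1) >> 3, (e - 1) >> 3
def r2bParent (p : Int × Int) : Int × Int := ((p.1 - 1) >>> (3:Nat), (p.2 - 1) >>> (3:Nat))

-- 'stack.append((b, e)); b, e = (b-1)>>3, (e-1)>>3' (the loop variable is unused in Python too)
def r2bBuild (st : List (Int × Int) × (Int × Int)) (_ : Int) : List (Int × Int) × (Int × Int) :=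
  (st.1 ++ [st.2], r2bParent st.2)

-- 'while stack: b, e = stack.pop(); yield from range(b, e+1)': popping from the end
-- consumes the stack back-to-front, i.e. it walks stack.reverse front-to-back
def r2bEmit : List (Int × Int) → List Int
  | [] => []
  | p :: rest => PySem.List.pyRange p.1 (p.2 + 1) 1 ++ r2bEmit rest

def reg2bins_alt (begin : Int) (end_ : Int) (min_shift : Int) (depth : Int) : List Int :=
  if depth < 0 then []
  else
    let t := PySem.Int.floordiv ((8:Int) ^ depth.toNat - 1) 7
    let st := (PySem.List.pyRange 0 (depth + 1) 1).foldl r2bBuild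
        ([], (t + (begin >>> min_shift.toNat), t + (end_ >>> min_shift.toNat)))
    r2bEmit st.1.reverse

-- ===== PRECONDITION & SPEC =====
-- Pre_ excludes exactly the inputs on which the Python A raises ValueError
-- (a negative shift count: some level runs with shift min_shift < 0, i.e. depth ≥ 0 ∧ min_shift < 0).
def Pre_reg2bins (begin : Int) (end_ : Int) (min_shift : Int) (depth : Int) : Prop :=
  0 ≤ depth → 0 ≤ min_shift
instance (begin : Int) (end_ : Int) (min_shift : Int) (depth : Int) : Decidable (Pre_reg2bins begin end_ min_shift depth) := by unfold Pre_reg2bins; infer_instance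
def pvWitness_reg2bins : Int × Int × Int × Int := (100, 5000, 4, 2)

def Spec_reg2bins (begin : Int) (end_ : Int) (min_shift : Int) (depth : Int) (out : List Int) : Prop := out = reg2bins_alt begin end_ min_shift depth
instance (begin : Int) (end_ : Int) (min_shift : Int) (depth : Int) (out : List Int) : Decidable (Spec_reg2bins begin end_ min_shift depth out) := by unfold Spec_reg2bins; infer_instance

-- ===== CLAIM (what is proved, stated in full; the proofs are below) =====
def Claim_equal_reg2bins : Prop := ∀ (begin : Int) (end_ : Int) (min_shift : Int) (depth : Int), Dom_reg2bins begin end_ min_shift depth → Pre_reg2bins begin end_ min_shift depth → Spec_reg2bins begin end_ min_shift depth (reg2bins begin end_ min_shift depth)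

-- ===== LEMMAS AND PROOFS =====

-- the (b, e) pair A works with at level l (closed forms of its accumulators t and s)
def r2bLev (begin : Int) (end_ : Int) (msN : Nat) (dN : Nat) (l : Nat) : Int × Int :=
  (PySem.Int.floordiv ((8:Int) ^ l - 1) 7 + (begin >>> (msN + 3 * (dN - l))),
   PySem.Int.floordiv ((8:Int) ^ l - 1) 7 + (end_ >>> (msN + 3 * (dN - l))))

-- the bins A yields at level l, written with closed-form t and s
def r2bLevelA (begin : Int) (end_ : Int) (min_shift : Int) (depth : Int) (l : Int) : List Int :=
  let s := min_shift + 3 * (depth - l)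
  let t := PySem.Int.floordiv ((1:Int) <<< (3 * l).toNat - 1) 7
  PySem.List.pyRange (t + (begin >>> s.toNat)) (t + (end_ >>> s.toNat) + 1) 1

-- A's inner yield loop appends the range to the accumulator (n is dead state)
lemma r2b_inner_fold (ys : List Int) (acc : List Int) (n : Int) :
    ys.foldl (fun (p : List Int × Int) k => (p.1 ++ [k], p.2 + 1)) (acc, n)
      = (acc ++ ys, n + ys.length) := by
  induction ys generalizing acc n with
  | nil => simp
  | cons y ys ih =>
      simp only [List.foldl_cons, ih, List.length_cons]
      refine Prod.ext (by simp) (by simp; omega)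

lemma dvd_pow8_sub_one (n : Nat) : (7:Int) ∣ (8:Int) ^ n - 1 := by
  induction n with
  | zero => simp
  | succ n ih =>
      have : (8:Int) ^ (n+1) - 1 = 7 * 8 ^ n + (8 ^ n - 1) := by ring
      rw [this]
      exact dvd_add (Dvd.intro _ rfl) ih

lemma floordiv_pow8 (n : Nat) :
    PySem.Int.floordiv ((8:Int) ^ (n+1) - 1) 7
      = PySem.Int.floordiv ((8:Int) ^ n - 1) 7 + 8 ^ n := by
  obtain ⟨k, hk⟩ := dvd_pow8_sub_one n
  have h8 : (8:Int) ^ (n+1) - 1 = 7 * (k + 8 ^ n) := by rw [pow_succ]; linarith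
  have h1 : PySem.Int.floordiv ((8:Int) ^ n - 1) 7 = k := by
    rw [PySem.Int.floordiv_eq_iff_of_pos (by norm_num : (0:Int) < 7)]; omega
  have h2 : PySem.Int.floordiv ((8:Int) ^ (n+1) - 1) 7 = k + 8 ^ n := by
    rw [PySem.Int.floordiv_eq_iff_of_pos (by norm_num : (0:Int) < 7)]; omega
  rw [h1, h2]

-- successive offsets: t_{l+1} - 1 = 8 * t_l
lemma t_succ (l : Nat) :
    PySem.Int.floordiv ((8:Int) ^ (l+1) - 1) 7 - 1
      = 8 * PySem.Int.floordiv ((8:Int) ^ l - 1) 7 := by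
  obtain ⟨k, hk⟩ := dvd_pow8_sub_one l
  have h1 : PySem.Int.floordiv ((8:Int) ^ l - 1) 7 = k := by
    rw [PySem.Int.floordiv_eq_iff_of_pos (by norm_num : (0:Int) < 7)]; omega
  have h8 : (8:Int) ^ (l+1) - 1 = 7 * (8 * k + 1) := by rw [pow_succ]; linarith
  have h2 : PySem.Int.floordiv ((8:Int) ^ (l+1) - 1) 7 = 8 * k + 1 := by
    rw [PySem.Int.floordiv_eq_iff_of_pos (by norm_num : (0:Int) < 7)]; omega
  rw [h1, h2]; ring

-- floor shift splits off a multiple of 8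
lemma shift3_add_mul8 (t y : Int) : (8 * t + y) >>> (3:Nat) = t + (y >>> (3:Nat)) := by
  simp [Int.shiftRight_eq_div_pow]; omega

-- the parent map sends level l+1's pair to level l's
lemma parent_lev (begin end_ : Int) (msN dN l : Nat) (hl : l < dN) :
    r2bParent (r2bLev begin end_ msN dN (l+1)) = r2bLev begin end_ msN dN l := by
  unfold r2bParent r2bLev
  have hsh : ∀ x : Int,
      (PySem.Int.floordiv ((8:Int) ^ (l+1) - 1) 7 + (x >>> (msN + 3 * (dN - (l+1)))) - 1) >>> (3:Nat)
        = PySem.Int.floordiv ((8:Int) ^ l - 1) 7 + (x >>> (msN + 3 * (dN - l))) := by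
    intro x
    have h1 : PySem.Int.floordiv ((8:Int) ^ (l+1) - 1) 7 + (x >>> (msN + 3 * (dN - (l+1)))) - 1
        = 8 * PySem.Int.floordiv ((8:Int) ^ l - 1) 7 + (x >>> (msN + 3 * (dN - (l+1)))) := by
      rw [← t_succ l]; ring
    rw [h1, shift3_add_mul8, ← Int.shiftRight_add]
    congr 2
    omega
  exact Prod.ext (hsh begin) (hsh end_)

lemma iterate_parent (begin end_ : Int) (msN dN : Nat) (i : Nat) (hi : i ≤ dN) :
    r2bParent^[i] (r2bLev begin end_ msN dN dN) = r2bLev begin end_ msN dN (dN - i) := by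
  induction i with
  | zero => simp
  | succ i ih =>
      rw [Function.iterate_succ_apply', ih (by omega)]
      have h : dN - i = (dN - (i+1)) + 1 := by omega
      rw [h, parent_lev begin end_ msN dN _ (by omega)]

-- B's build loop records the parent iterates and keeps the next one as current state
lemma build_fold (l : List Int) (stack : List (Int × Int)) (c : Int × Int) :
    l.foldl r2bBuild (stack, c)
      = (stack ++ (List.range l.length).map (fun i => r2bParent^[i] c), r2bParent^[l.length] c) := by
  induction l generalizing stack c with
  | nil => simp
  | cons x xs ih =>
      simp only [List.foldl_cons, List.length_cons]
      rw [r2bBuild, ih]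
      refine Prod.ext ?_ ?_
      · simp [List.range_succ_eq_map, List.append_assoc, Function.iterate_succ_apply,
          Function.comp_def]
      · simp [Function.iterate_succ_apply]

-- B's pop loop flattens the ranges of its input
lemma emit_eq_flatMap (ps : List (Int × Int)) :
    r2bEmit ps = ps.flatMap (fun p => PySem.List.pyRange p.1 (p.2 + 1) 1) := by
  induction ps with
  | nil => rfl
  | cons p rest ih => simp [r2bEmit, ih]

-- reversing the stack turns 'level dN - i' into 'level i'
lemma reverse_map_range_sub {α : Type} (f : Nat → α) (m : Nat) :
    ((List.range (m+1)).map (fun i => f (m - i))).reverse = (List.range (m+1)).map f := by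
  apply List.ext_getElem
  · simp
  · intro k h1 h2
    simp only [List.length_reverse, List.length_map, List.length_range] at h1 h2
    simp only [List.getElem_reverse, List.length_map, List.length_range,
      List.getElem_map, List.getElem_range]
    congr 1
    omega

-- the A-fold over the first n levels, started in A's initial state, equals
-- the closed-form per-level ranges concatenated over those levels
lemma r2b_levels (begin end_ min_shift depth : Int) (n : Nat) :
    (PySem.List.pyRange 0 (n : Int) 1).foldl (r2bStepA begin end_)
        ([], 0, min_shift + 3 * depth)
      = ((PySem.List.pyRange 0 (n : Int) 1).flatMap (r2bLevelA begin end_ min_shift depth),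
         PySem.Int.floordiv ((8:Int) ^ n - 1) 7,
         min_shift + 3 * depth - 3 * n) := by
  induction n with
  | zero =>
      simp [PySem.List.pyRange_one_eq_nil, PySem.Int.floordiv]
  | succ n ih =>
      have hsplit : PySem.List.pyRange 0 ((n:Int) + 1) 1
          = PySem.List.pyRange 0 (n : Int) 1 ++ [(n : Int)] :=
        PySem.List.pyRange_one_succ_right (by positivity : (0:Int) ≤ n)
      push_cast
      rw [hsplit, List.foldl_append, List.flatMap_append, ih]
      simp only [List.foldl_cons, List.foldl_nil, List.flatMap_cons, List.flatMap_nil,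
        List.append_nil]
      unfold r2bStepA r2bLevelA
      simp only [r2b_inner_fold]
      have hs : min_shift + 3 * depth - 3 * (n : Int) = min_shift + 3 * (depth - (n : Int)) := by ring
      have ht3 : (((n : Int) <<< (1:Nat)) + (n : Int)).toNat = 3 * n := by
        rw [Int.shiftLeft_eq]; omega
      have hsh : ((1:Int) <<< (3 * n)) = (8:Int) ^ n := by
        rw [Int.shiftLeft_eq, one_mul, pow_mul]; norm_num
      have h3n : (3 * (n:Int)).toNat = 3 * n := by omega
      refine Prod.ext ?_ (Prod.ext ?_ ?_)
      · simp only [hs, h3n, hsh]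
      · simp only [ht3, hsh, floordiv_pow8]
      · push_cast; ring

-- inside Pre_, A's level-l range is B's r2bLev pair's range
lemma levelA_eq_lev (begin end_ min_shift depth : Int) (hd : 0 ≤ depth) (hm : 0 ≤ min_shift)
    (l : Nat) (hl : (l : Int) ≤ depth) :
    r2bLevelA begin end_ min_shift depth (l : Int)
      = PySem.List.pyRange (r2bLev begin end_ min_shift.toNat depth.toNat l).1
          ((r2bLev begin end_ min_shift.toNat depth.toNat l).2 + 1) 1 := by
  unfold r2bLevelA r2bLev
  have hsh : ((1:Int) <<< (3 * (l:Int)).toNat) = (8:Int) ^ l := by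
    have : (3 * (l:Int)).toNat = 3 * l := by omega
    rw [this, Int.shiftLeft_eq, one_mul, pow_mul]; norm_num
  have hs : (min_shift + 3 * (depth - (l:Int))).toNat
      = min_shift.toNat + 3 * (depth.toNat - l) := by omega
  simp only [hsh, hs]

-- ===== VERDICT (by name: the statement is the Claim_ definition above) =====
theorem reg2bins_spec : Claim_equal_reg2bins := by
  intro begin end_ min_shift depth _ hpre
  unfold Spec_reg2bins reg2bins reg2bins_alt
  rcases lt_or_ge depth 0 with h | h
  · rw [if_pos h, PySem.List.pyRange_one_eq_nil (by omega)]; rfl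
  · have hm : 0 ≤ min_shift := hpre h
    rw [if_neg (by omega)]
    set dN := depth.toNat with hdN
    have hd : (dN : Int) = depth := Int.toNat_of_nonneg h
    have hn : ((depth + 1).toNat : Int) = depth + 1 := Int.toNat_of_nonneg (by omega)
    have hinit : min_shift + (depth <<< (1:Nat)) + depth = min_shift + 3 * depth := by
      rw [Int.shiftLeft_eq]; ring
    -- A's side: closed-form per-level ranges
    rw [hinit, ← hn, r2b_levels]
    -- B's side: characterize the build fold, then the emission
    have hc : (PySem.Int.floordiv ((8:Int) ^ dN - 1) 7 + (begin >>> min_shift.toNat),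
               PySem.Int.floordiv ((8:Int) ^ dN - 1) 7 + (end_ >>> min_shift.toNat))
        = r2bLev begin end_ min_shift.toNat dN dN := by
      unfold r2bLev; simp
    have hlen : (PySem.List.pyRange 0 (((depth + 1).toNat : Int)) 1).length = dN + 1 := by
      rw [PySem.List.length_pyRange_one]; omega
    dsimp only
    rw [hc, build_fold]
    simp only [hlen, List.nil_append]
    have hstack : ((List.range (dN + 1)).map
          (fun i => r2bParent^[i] (r2bLev begin end_ min_shift.toNat dN dN))).reverse
        = (List.range (dN + 1)).map (r2bLev begin end_ min_shift.toNat dN) := by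
      have : ∀ i ∈ List.range (dN + 1),
          r2bParent^[i] (r2bLev begin end_ min_shift.toNat dN dN)
            = r2bLev begin end_ min_shift.toNat dN (dN - i) := by
        intro i hi
        exact iterate_parent begin end_ min_shift.toNat dN i (by simp at hi; omega)
      rw [List.map_congr_left this, reverse_map_range_sub]
    rw [hstack, emit_eq_flatMap]
    -- both sides are now flatMaps over the levels 0..dN
    rw [PySem.List.pyRange_one]
    simp only [sub_zero, hn, List.flatMap_map, zero_add]
    have hidx : ((depth + 1).toNat) = dN + 1 := by omega
    rw [hidx]
    apply List.flatMap_congr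
    intro l hl
    simp only [List.mem_range] at hl
    exact levelA_eq_lev begin end_ min_shift depth h hm l (by omega)
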